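-- pv_equiv track=rewrite | github.com/HiThisQ/school | programovani 1/krabice_pokus3.py | trideni
-- ===== SOURCE A (Python) =====
-- def trideni(a, b, c, d, e, f):
--     s = 0
--
--     while f > 0:
--         s += 1
--         f -= 1
--
--     while e > 0:
--         krabice_a_e = 91
--         if a > 0:
--             if a <= krabice_a_e:
--                 dopalety_a_e = a
--             else:
--                 dopalety_a_e = krabice_a_e
--             a -= dopalety_a_e
--         s += 1
--         e -= 1
--
--     while d > 0:
--         krabice_b_d = 25
--         krabice_a_d = 100
--         if b > 0:
--             if b <= krabice_b_d:
--                 dopalety_b_d = b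
--             else:
--                 dopalety_b_d = krabice_b_d
--             b -= dopalety_b_d
--         if b == 0 and a > 0:
--             if a <= krabice_a_d:
--                 dopalety_a_d = a
--             else:
--                 dopalety_a_d = krabice_a_d
--             a -= dopalety_a_d
--         s += 1
--         d -= 1
--
--     while c > 0:
--         krabice_b_c = 90
--         krabice_a_c = 16
--         if c >= 8:
--             c -= 8
--         else:
--             if b > 0:
--                 if b <= krabice_b_c:
--                     dopalety_b_c = b
--                     b -= dopalety_b_c
--                 else:
--                     dopalety_b_c = krabice_b_c
--                     b -= dopalety_b_c
--             if a > 0: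
--                 if a <= krabice_a_c:
--                     dopalety_a_c = a
--                 else:
--                     dopalety_a_c = krabice_a_c
--                 a -= dopalety_a_c
--             c -= 1
--         s += 1
--
--     while b > 0:
--         krabice_b_b = 27
--         krabice_a_b = 216
--         if b <= krabice_b_b:
--             dopalety_b_b = b
--         else:
--             dopalety_b_b = krabice_b_b
--         b -= dopalety_b_b
--         if b == 0 and a > 0:
--             if a <= krabice_a_b:
--                 dopalety_a_b = a
--             else:
--                 dopalety_a_b = krabice_a_b
--             a -= dopalety_a_b
--         s += 1
--
--     while a > 0:
--         krabice_a_a = 216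
--         if a <= krabice_a_a:
--             dopalety_a_a = a
--         else:
--             dopalety_a_a = krabice_a_a
--         a -= dopalety_a_a
--         s += 1
--
--     return s
-- ===== SOURCE B (Python) =====
-- def trideni(a, b, c, d, e, f):
--     # Closed-form: each while loop's iteration count and reserve depletion
--     # computed with integer arithmetic instead of iterating.
--     def ceil_div(x, y):
--         return -(-x // y)
--
--     s = max(f, 0)
--
--     # e-loop: e iterations, each takes up to 91 from a
--     if e > 0:
--         s += e
--     if e > 0 and a > 0:
--         a = max(a - 91 * e, 0)
--
--     # d-loop: d iterations, each takes up to 25 from b; the iterations where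
--     # b has already hit 0 (cnt of them) each take up to 100 from a
--     if d > 0:
--         cnt = max(d - ceil_div(b, 25) + 1, 0) if b > 0 else (d if b == 0 else 0)
--         s += d
--     else:
--         cnt = 0
--     if d > 0 and b > 0:
--         b = max(b - 25 * d, 0)
--     if a > 0 and cnt > 0:
--         a = max(a - 100 * cnt, 0)
--
--     # c-loop: c//8 big steps, then c%8 single steps, each single step taking
--     # up to 90 from b and up to 16 from a
--     r = c % 8
--     if c > 0:
--         s += c // 8 + r
--     if c > 0 and r > 0 and b > 0:
--         b = max(b - 90 * r, 0)
--     if c > 0 and r > 0 and a > 0: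
--         a = max(a - 16 * r, 0)
--
--     # b-loop: ceil(b/27) iterations; only the last one takes up to 216 from a
--     if b > 0:
--         s += ceil_div(b, 27)
--     if b > 0 and a > 0:
--         a = max(a - 216, 0)
--
--     # a-loop: ceil(a/216) iterations
--     if a > 0:
--         s += ceil_div(a, 216)
--
--     return s
-- ===== Notes on version B (the rewrite author's own statement) =====
-- stated objective: faster
-- what changed: Replaced the six counting-down while loops by closed-form integer arithmetic: each loop's iteration count and total reserve depletion is computed with ceiling division, floor division and mod.
import Mathlib
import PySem

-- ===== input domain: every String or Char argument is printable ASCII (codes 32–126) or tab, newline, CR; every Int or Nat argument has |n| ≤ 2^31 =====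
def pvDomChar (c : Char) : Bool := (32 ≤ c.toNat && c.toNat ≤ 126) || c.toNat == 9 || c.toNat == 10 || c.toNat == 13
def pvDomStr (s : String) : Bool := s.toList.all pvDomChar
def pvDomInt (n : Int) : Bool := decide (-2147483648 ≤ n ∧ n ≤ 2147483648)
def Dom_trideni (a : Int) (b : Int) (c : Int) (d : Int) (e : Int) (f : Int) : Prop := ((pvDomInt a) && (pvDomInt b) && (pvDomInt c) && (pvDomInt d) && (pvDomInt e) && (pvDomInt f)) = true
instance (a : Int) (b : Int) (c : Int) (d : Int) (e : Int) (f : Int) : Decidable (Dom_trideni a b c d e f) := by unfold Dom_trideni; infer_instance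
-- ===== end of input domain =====

-- B replaces A's six depletion while-loops by closed-form integer arithmetic
-- (ceiling divisions / mod give each loop's iteration count and total depletion);
-- proved equal to A on all integer inputs.

-- ===== PORT A =====
-- literal port of A's six while-loops, each as a recursion on its counter

def trideniLoopF (f s : Int) : Int :=
  if f > 0 then trideniLoopF (f - 1) (s + 1) else s
termination_by f.toNat
decreasing_by omega

def trideniLoopE (e a s : Int) : Int × Int :=
  if e > 0 then
    let a' := if a > 0 then (if a ≤ 91 then a - a else a - 91) else a
    trideniLoopE (e - 1) a' (s + 1)
  else (a, s)
termination_by e.toNat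
decreasing_by omega

def trideniLoopD (d b a s : Int) : Int × Int × Int :=
  if d > 0 then
    let b' := if b > 0 then (if b ≤ 25 then b - b else b - 25) else b
    let a' := if b' = 0 ∧ a > 0 then (if a ≤ 100 then a - a else a - 100) else a
    trideniLoopD (d - 1) b' a' (s + 1)
  else (b, a, s)
termination_by d.toNat
decreasing_by omega

def trideniLoopC (c b a s : Int) : Int × Int × Int :=
  if h : c > 0 then
    if c ≥ 8 then trideniLoopC (c - 8) b a (s + 1)
    else
      let b' := if b > 0 then (if b ≤ 90 then b - b else b - 90) else b
      let a' := if a > 0 then (if a ≤ 16 then a - a else a - 16) else a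
      trideniLoopC (c - 1) b' a' (s + 1)
  else (b, a, s)
termination_by c.toNat
decreasing_by all_goals omega

def trideniLoopB (b a s : Int) : Int × Int :=
  if h : b > 0 then
    let b' := if b ≤ 27 then b - b else b - 27
    let a' := if b' = 0 ∧ a > 0 then (if a ≤ 216 then a - a else a - 216) else a
    trideniLoopB b' a' (s + 1)
  else (a, s)
termination_by b.toNat
decreasing_by split <;> omega

def trideniLoopA (a s : Int) : Int :=
  if h : a > 0 then
    let a' := if a ≤ 216 then a - a else a - 216
    trideniLoopA a' (s + 1)
  else s
termination_by a.toNat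
decreasing_by split <;> omega

def trideni (a : Int) (b : Int) (c : Int) (d : Int) (e : Int) (f : Int) : Int :=
  let s1 := trideniLoopF f 0
  let (a1, s2) := trideniLoopE e a s1
  let (b1, a2, s3) := trideniLoopD d b a1 s2
  let (b2, a3, s4) := trideniLoopC c b1 a2 s3
  let (a4, s5) := trideniLoopB b2 a3 s4
  trideniLoopA a4 s5

-- ===== PORT B =====
-- literal port of Source B: straight-line closed-form arithmetic (sequential
-- shadowing lets mirror Source B's sequential reassignments)

def trideniCeilDiv (x y : Int) : Int := -(PySem.Int.floordiv (-x) y)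

def trideni_alt (a : Int) (b : Int) (c : Int) (d : Int) (e : Int) (f : Int) : Int :=
  let s := max f 0
  -- e-loop
  let s := if 0 < e then s + e else s
  let a := if 0 < e ∧ 0 < a then max (a - 91 * e) 0 else a
  -- d-loop
  let cnt := if 0 < d then (if 0 < b then max (d - trideniCeilDiv b 25 + 1) 0 else if b = 0 then d else 0) else 0
  let s := if 0 < d then s + d else s
  let b := if 0 < d ∧ 0 < b then max (b - 25 * d) 0 else b
  let a := if 0 < a ∧ 0 < cnt then max (a - 100 * cnt) 0 else a
  -- c-loop
  let r := PySem.Int.mod c 8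
  let s := if 0 < c then s + PySem.Int.floordiv c 8 + r else s
  let b := if 0 < c ∧ 0 < r ∧ 0 < b then max (b - 90 * r) 0 else b
  let a := if 0 < c ∧ 0 < r ∧ 0 < a then max (a - 16 * r) 0 else a
  -- b-loop
  let s := if 0 < b then s + trideniCeilDiv b 27 else s
  let a := if 0 < b ∧ 0 < a then max (a - 216) 0 else a
  -- a-loop
  if 0 < a then s + trideniCeilDiv a 216 else s

-- ===== PRECONDITION & SPEC =====
def Spec_trideni (a : Int) (b : Int) (c : Int) (d : Int) (e : Int) (f : Int) (out : Int) : Prop := out = trideni_alt a b c d e f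
instance (a : Int) (b : Int) (c : Int) (d : Int) (e : Int) (f : Int) (out : Int) : Decidable (Spec_trideni a b c d e f out) := by unfold Spec_trideni; infer_instance

-- ===== CLAIM (what is proved, stated in full; the proofs are below) =====
def Claim_equal_trideni : Prop := ∀ (a : Int) (b : Int) (c : Int) (d : Int) (e : Int) (f : Int), Dom_trideni a b c d e f → Spec_trideni a b c d e f (trideni a b c d e f)

-- ===== LEMMAS AND PROOFS =====

theorem loopF_eq (f s : Int) : trideniLoopF f s = s + max f 0 := by
  fun_induction trideniLoopF f s <;> omega

theorem loopF_eq0 (f : Int) : trideniLoopF f 0 = max f 0 := by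
  rw [loopF_eq]; omega

theorem loopE_eq (e a s : Int) :
    trideniLoopE e a s =
      ((if 0 < e ∧ 0 < a then max (a - 91 * e) 0 else a),
       (if 0 < e then s + e else s)) := by
  fun_induction trideniLoopE e a s with
  | case1 e a s he a' ih =>
      rw [ih]
      simp only [a', Prod.mk.injEq]
      constructor
      · split_ifs <;> omega
      · split_ifs <;> omega
  | case2 e a s he =>
      simp only [Prod.mk.injEq]
      constructor
      · split_ifs <;> omega
      · split_ifs <;> omega

theorem loopD_eq (d b a s : Int) :
    trideniLoopD d b a s =
      ((if 0 < d ∧ 0 < b then max (b - 25 * d) 0 else b),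
       (let cnt := if 0 < d then (if 0 < b then max (d - -(-b / 25) + 1) 0 else if b = 0 then d else 0) else 0
        if 0 < a ∧ 0 < cnt then max (a - 100 * cnt) 0 else a),
       (if 0 < d then s + d else s)) := by
  fun_induction trideniLoopD d b a s with
  | case1 d b a s hd b' a' ih =>
      rw [ih]
      simp only [b', a', Prod.mk.injEq]
      refine ⟨by split_ifs <;> omega, by split_ifs <;> omega, by split_ifs <;> omega⟩
  | case2 d b a s hd =>
      simp only [Prod.mk.injEq]
      refine ⟨by split_ifs <;> omega, by split_ifs <;> omega, by split_ifs <;> omega⟩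

theorem loopC_eq (c b a s : Int) :
    trideniLoopC c b a s =
      ((if 0 < c ∧ 0 < c % 8 ∧ 0 < b then max (b - 90 * (c % 8)) 0 else b),
       (if 0 < c ∧ 0 < c % 8 ∧ 0 < a then max (a - 16 * (c % 8)) 0 else a),
       (if 0 < c then s + c / 8 + c % 8 else s)) := by
  fun_induction trideniLoopC c b a s with
  | case1 c b a s hc h8 ih =>
      rw [ih]
      simp only [Prod.mk.injEq]
      refine ⟨by split_ifs <;> omega, by split_ifs <;> omega, by split_ifs <;> omega⟩
  | case2 c b a s hc h8 b' a' ih =>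
      rw [ih]
      simp only [b', a', Prod.mk.injEq]
      refine ⟨by split_ifs <;> omega, by split_ifs <;> omega, by split_ifs <;> omega⟩
  | case3 c b a s hc =>
      simp only [Prod.mk.injEq]
      refine ⟨by split_ifs <;> omega, by split_ifs <;> omega, by split_ifs <;> omega⟩

theorem loopB_eq (b a s : Int) :
    trideniLoopB b a s =
      ((if 0 < b ∧ 0 < a then max (a - 216) 0 else a),
       (if 0 < b then s + -(-b / 27) else s)) := by
  fun_induction trideniLoopB b a s with
  | case1 b a s hb b' a' ih =>
      rw [ih]
      simp only [b', a', Prod.mk.injEq]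
      refine ⟨by split_ifs <;> omega, by split_ifs <;> omega⟩
  | case2 b a s hb =>
      simp only [Prod.mk.injEq]
      refine ⟨by split_ifs <;> omega, by split_ifs <;> omega⟩

theorem loopA_eq (a s : Int) :
    trideniLoopA a s = if 0 < a then s + -(-a / 216) else s := by
  fun_induction trideniLoopA a s with
  | case1 a s ha a' ih =>
      rw [ih]
      simp only [a']
      split_ifs <;> omega
  | case2 a s ha => split_ifs <;> omega

theorem ceilDiv25 (x : Int) : trideniCeilDiv x 25 = -(-x / 25) := by
  unfold trideniCeilDiv
  rw [PySem.Int.floordiv_eq_ediv_of_pos (by omega : (0:Int) < 25)]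

theorem ceilDiv27 (x : Int) : trideniCeilDiv x 27 = -(-x / 27) := by
  unfold trideniCeilDiv
  rw [PySem.Int.floordiv_eq_ediv_of_pos (by omega : (0:Int) < 27)]

theorem ceilDiv216 (x : Int) : trideniCeilDiv x 216 = -(-x / 216) := by
  unfold trideniCeilDiv
  rw [PySem.Int.floordiv_eq_ediv_of_pos (by omega : (0:Int) < 216)]

-- ===== VERDICT (by name: the statement is the Claim_ definition above) =====
theorem trideni_spec : Claim_equal_trideni := by
  intro a b c d e f _
  unfold Spec_trideni
  simp only [trideni, trideni_alt, ceilDiv25, ceilDiv27, ceilDiv216,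
    PySem.Int.mod_eq_emod_of_pos (by omega : (0:Int) < 8),
    PySem.Int.floordiv_eq_ediv_of_pos (by omega : (0:Int) < 8),
    loopF_eq0]
  simp only [loopE_eq]
  simp only [loopD_eq]
  simp only [loopC_eq]
  simp only [loopB_eq]
  simp only [loopA_eq]
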